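-- pv_equiv track=rewrite | github.com/fall-out-bug/AI_Advent_Challenge | scripts/e2e/epic_27/test_scenario_3_large_package.py | check_for_context_errors
-- ===== SOURCE A (Python) =====
-- def check_for_context_errors(output: str) -> bool:
--     """Check if output contains context limit errors.
--
--     Args:
--         output: Test Agent output.
--
--     Returns:
--         True if context errors found, False otherwise.
--     """
--     error_keywords = [
--         "context window",
--         "token limit",
--         "too large",
--         "exceeds",
--         "context overflow",
--     ]
--     output_lower = output.lower()
--     return any(keyword in output_lower for keyword in error_keywords)
-- ===== SOURCE B (Python) =====
-- _KEYWORDS = (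
--     "context window",
--     "token limit",
--     "too large",
--     "exceeds",
--     "context overflow",
-- )
--
--
-- def check_for_context_errors(output: str) -> bool:
--     low = output.lower()
--     # Single left-to-right pass: at each position test whether one of the
--     # keywords starts there, instead of scanning the string once per keyword.
--     return any(low.startswith(_KEYWORDS, i) for i in range(len(low) + 1))
-- ===== Notes on version B (the rewrite author's own statement) =====
-- stated objective: alternative
-- what changed: Replaces the per-keyword substring scans (one 'in' pass over the string for each of the five keywords) by a single left-to-right pass over positions testing str.startswith with the keyword tuple at each index.
import Mathlib
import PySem

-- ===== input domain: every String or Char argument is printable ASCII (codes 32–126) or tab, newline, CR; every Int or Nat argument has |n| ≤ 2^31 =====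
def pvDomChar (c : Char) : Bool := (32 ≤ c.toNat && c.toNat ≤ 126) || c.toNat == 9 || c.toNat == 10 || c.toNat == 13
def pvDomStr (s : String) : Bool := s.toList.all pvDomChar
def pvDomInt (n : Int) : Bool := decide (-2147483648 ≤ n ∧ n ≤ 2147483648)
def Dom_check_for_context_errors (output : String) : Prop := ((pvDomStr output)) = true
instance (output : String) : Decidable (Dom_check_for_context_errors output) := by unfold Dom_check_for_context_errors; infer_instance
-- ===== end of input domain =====

-- ===== PORT A =====
-- B replaces A's per-keyword substring scans by one pass over positions; same result, similar cost.
def pvErrorKeywords : List String :=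
  ["context window", "token limit", "too large", "exceeds", "context overflow"]

def check_for_context_errors (output : String) : Bool :=
  let output_lower := PySem.Str.lower output
  pvErrorKeywords.any (fun keyword => PySem.Str.isIn keyword output_lower)

-- ===== PORT B =====
-- low.startswith(_KEYWORDS, i) is ported by hand as a prefix test on low.toList.drop i:
-- exact for 0 ≤ i ≤ len(low), the only indices range() produces here.
def check_for_context_errors_alt (output : String) : Bool :=
  let low := PySem.Str.lower output
  (List.range ((PySem.Str.len low).toNat + 1)).any (fun i =>
    pvErrorKeywords.any (fun k => PySem.Chars.startswith (low.toList.drop i) k.toList))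

-- ===== PRECONDITION & SPEC =====
def Spec_check_for_context_errors (output : String) (out : Bool) : Prop := out = check_for_context_errors_alt output
instance (output : String) (out : Bool) : Decidable (Spec_check_for_context_errors output out) := by unfold Spec_check_for_context_errors; infer_instance

-- ===== CLAIM (what is proved, stated in full; the proofs are below) =====
def Claim_equal_check_for_context_errors : Prop := ∀ (output : String), Dom_check_for_context_errors output → Spec_check_for_context_errors output (check_for_context_errors output)

-- ===== LEMMAS AND PROOFS =====
-- For a nonempty keyword k, "k is an infix of s" = "some position i ≤ length has k as prefix of s.drop i".
lemma pv_isIn_eq_any_range (s k : List Char) (hk : k ≠ []) :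
    PySem.Chars.isIn k s =
      (List.range (s.length + 1)).any (fun i => PySem.Chars.startswith (s.drop i) k) := by
  apply Bool.eq_iff_iff.mpr
  rw [List.any_eq_true]
  constructor
  · intro h
    obtain ⟨j, hj⟩ := (PySem.Chars.exists_prefix_drop_iff_isIn (sub := k) (s := s)).mpr h
    refine ⟨min j s.length, ?_, ?_⟩
    · exact List.mem_range.mpr (by omega)
    · rw [PySem.Chars.startswith_iff]
      rcases le_or_gt j s.length with hle | hgt
      · simpa [min_eq_left hle] using hj
      · exfalso
        have : s.drop j = [] := List.drop_eq_nil_of_le (by omega)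
        rw [this] at hj
        exact hk (List.prefix_nil.mp hj)
  · rintro ⟨i, -, hi⟩
    rw [PySem.Chars.startswith_iff] at hi
    exact (PySem.Chars.exists_prefix_drop_iff_isIn (sub := k) (s := s)).mp ⟨i, hi⟩

-- any is determined by the predicate's values on the list's members.
lemma pv_any_congr_mem {α : Type} (l : List α) {p q : α → Bool}
    (h : ∀ a ∈ l, p a = q a) : l.any p = l.any q := by
  induction l with
  | nil => rfl
  | cons x xs ih =>
    simp only [List.any_cons, h x (by simp)]
    rw [ih (fun a ha => h a (by simp [ha]))]

-- The two nested 'any's commute (both decide the same double existential).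
lemma pv_any_any_comm {α β : Type} (l1 : List α) (l2 : List β) (p : β → α → Bool) :
    l1.any (fun a => l2.any (fun b => p b a)) = l2.any (fun b => l1.any (fun a => p b a)) := by
  apply Bool.eq_iff_iff.mpr
  simp only [List.any_eq_true]
  constructor
  · rintro ⟨a, ha, b, hb, h⟩; exact ⟨b, hb, a, ha, h⟩
  · rintro ⟨b, hb, a, ha, h⟩; exact ⟨a, ha, b, hb, h⟩

-- ===== VERDICT (by name: the statement is the Claim_ definition above) =====
theorem check_for_context_errors_spec : Claim_equal_check_for_context_errors := by
  intro output _
  unfold Spec_check_for_context_errors check_for_context_errors check_for_context_errors_alt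
  simp only [PySem.Str.isIn_eq, PySem.Str.len_eq, Int.toNat_natCast]
  generalize (PySem.Str.lower output).toList = t
  have h1 : pvErrorKeywords.any (fun k => PySem.Chars.isIn k.toList t)
      = pvErrorKeywords.any (fun k =>
          (List.range (t.length + 1)).any (fun i => PySem.Chars.startswith (t.drop i) k.toList)) := by
    apply pv_any_congr_mem
    intro k hk
    apply pv_isIn_eq_any_range
    fin_cases hk <;> decide
  rw [h1, pv_any_any_comm]
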